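-- pv_equiv track=rewrite | github.com/codi21/inteligencia_artifical | Genetico.py | seleccion
-- ===== SOURCE A (Python) =====
-- import math
--
-- def cant_amenazas(vec):
--     point = 0
--     for i in range (len(vec)):
--         j = 0
--         while(j < len(vec)):
--             if i != j :
--                 if (math.fabs(i - j) == math.fabs(vec[i] - vec[j])):
--                     point += 1
--             j+=1
--     return point
--
-- def calcular_fitness(p):
--     fit =[]
--     for i in range(len(p)):
--         fit.append((cant_amenazas(p[i]),i))
--     return fit
--
-- def seleccion(p):
--     fit = calcular_fitness(p)
--     fit.sort()
--     new_p = []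
--     if len(p) <= 2:
--         return p
--     for i in range(len(p)-2):
--         new_p.append(p[fit[i][1]])
--     return new_p
-- ===== SOURCE B (Python) =====
-- def seleccion(p):
--     if len(p) <= 2:
--         return p
--     def threats(vec):
--         t = 0
--         diag1 = {}
--         diag2 = {}
--         for i, v in enumerate(vec):
--             a = i - v
--             b = i + v
--             t += 2 * (diag1.get(a, 0) + diag2.get(b, 0))
--             diag1[a] = diag1.get(a, 0) + 1
--             diag2[b] = diag2.get(b, 0) + 1
--         return t
--     order = sorted(range(len(p)), key=lambda i: threats(p[i]))
--     return [p[i] for i in order[:len(p) - 2]]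
-- ===== Notes on version B (the rewrite author's own statement) =====
-- stated objective: faster
-- what changed: Replaces the per-board O(n^2) all-pairs threat comparison by a single enumerate pass that buckets queens per diagonal (i-v and i+v) in two dicts and adds 2*(bucket count) per queen, then sorts indices by that count and takes all but the worst two.
import Mathlib
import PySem

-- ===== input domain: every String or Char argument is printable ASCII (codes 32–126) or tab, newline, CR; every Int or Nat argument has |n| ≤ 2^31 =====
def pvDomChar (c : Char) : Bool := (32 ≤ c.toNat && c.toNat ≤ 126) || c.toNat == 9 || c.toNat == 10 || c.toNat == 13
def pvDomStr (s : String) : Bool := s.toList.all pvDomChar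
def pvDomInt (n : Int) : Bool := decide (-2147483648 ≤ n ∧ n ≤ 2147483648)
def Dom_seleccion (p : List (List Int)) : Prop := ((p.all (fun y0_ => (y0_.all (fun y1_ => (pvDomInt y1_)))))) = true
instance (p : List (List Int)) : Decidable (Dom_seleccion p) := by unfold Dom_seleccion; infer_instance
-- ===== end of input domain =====

-- ===== PORT A =====
-- B replaces A's per-board O(n^2) all-pairs threat scan by a single pass with diagonal hash buckets (same selection; objective: faster).

-- while(j < len(vec)): … ; j+=1   (literal while-loop recursion)
def pvWhileJ (vec : List Int) (n i : Int) (j : Int) (point : Int) : Int :=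
  if j < n then
    pvWhileJ vec n i (j + 1)
      (if i ≠ j then
        (if |i - j| = |PySem.List.pyGetD vec i 0 - PySem.List.pyGetD vec j 0| then point + 1 else point)
       else point)
  else point
termination_by (n - j).toNat
decreasing_by omega

-- math.fabs on ints within the domain is exact, ported as Int abs
def cant_amenazas (vec : List Int) : Int :=
  (PySem.List.pyRange 0 (vec.length : Int) 1).foldl
    (fun point i => pvWhileJ vec (vec.length : Int) i 0 point) 0

def calcular_fitness (p : List (List Int)) : List (Int × Int) :=
  (PySem.List.pyRange 0 (p.length : Int) 1).foldl
    (fun fit i => fit ++ [(cant_amenazas (PySem.List.pyGetD p i []), i)]) []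

-- fit.sort(): the tuples (fit, i) carry strictly increasing distinct indices i, so Python's
-- lexicographic tuple sort coincides exactly with this stable sort by the first component.
def seleccion (p : List (List Int)) : List (List Int) :=
  let fit := PySem.List.sorted (calcular_fitness p) (fun t => t.1) false
  if p.length ≤ 2 then p
  else
    (PySem.List.pyRange 0 ((p.length : Int) - 2) 1).foldl
      (fun new_p i => new_p ++ [PySem.List.pyGetD p (PySem.List.pyGetD fit i (0, 0)).2 []]) []

-- ===== PORT B =====
-- one enumerate pass: t += 2*(diag1.get(i-v,0) + diag2.get(i+v,0)); then bump both buckets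
def pvThreatStep (st : Int × PySem.Dict Int Int × PySem.Dict Int Int) (iv : Int × Int) :
    Int × PySem.Dict Int Int × PySem.Dict Int Int :=
  let a := iv.1 - iv.2
  let b := iv.1 + iv.2
  (st.1 + 2 * (st.2.1.getD a 0 + st.2.2.getD b 0),
   st.2.1.insert a (st.2.1.getD a 0 + 1),
   st.2.2.insert b (st.2.2.getD b 0 + 1))

def pvThreats (vec : List Int) : Int :=
  ((PySem.List.enumerate vec).foldl pvThreatStep (0, PySem.Dict.empty, PySem.Dict.empty)).1

def seleccion_alt (p : List (List Int)) : List (List Int) :=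
  if p.length ≤ 2 then p
  else
    let order := PySem.List.sorted (PySem.List.pyRange 0 (p.length : Int) 1)
      (fun i => pvThreats (PySem.List.pyGetD p i [])) false
    (PySem.List.slice order none (some ((p.length : Int) - 2))).map
      (fun i => PySem.List.pyGetD p i [])

-- ===== PRECONDITION & SPEC =====
def Spec_seleccion (p : List (List Int)) (out : List (List Int)) : Prop := out = seleccion_alt p
instance (p : List (List Int)) (out : List (List Int)) : Decidable (Spec_seleccion p out) := by unfold Spec_seleccion; infer_instance

-- ===== CLAIM (what is proved, stated in full; the proofs are below) =====
def Claim_equal_seleccion : Prop := ∀ (p : List (List Int)), Dom_seleccion p → Spec_seleccion p (seleccion p)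

-- ===== LEMMAS AND PROOFS =====

-- B-side loop value, with explicit count functions instead of dicts
def pvBump (c : Int → Int) (k : Int) : Int → Int := fun x => if x = k then c x + 1 else c x

def pvS : List Int → (Int → Int) → Int
  | [], _ => 0
  | k :: ks, c => 2 * c k + pvS ks (pvBump c k)

-- indicator of "indices i ≠ j with the same value of f"
def pvE (f : Nat → Int) (i j : Nat) : Int := if i ≠ j ∧ f i = f j then 1 else 0

-- A's pair condition at Nat indices
def pvInd (vec : List Int) (k j : Nat) : Int :=
  if (k:Int) ≠ (j:Int) ∧ |(k:Int) - (j:Int)| = |vec.getD k 0 - vec.getD j 0| then 1 else 0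

def pvF1 (vec : List Int) (m : Nat) : Int := (m:Int) - vec.getD m 0
def pvF2 (vec : List Int) (m : Nat) : Int := (m:Int) + vec.getD m 0

lemma pvS_append (k : Int) : ∀ (ks : List Int) (c : Int → Int),
    pvS (ks ++ [k]) c = pvS ks c + 2 * (c k + (ks.count k : Int)) := by
  intro ks
  induction ks with
  | nil => intro c; simp [pvS]
  | cons k0 ks ih =>
    intro c
    simp only [List.cons_append, pvS, ih, List.count_cons]
    by_cases h : k0 = k
    · simp [pvBump, h]; ring
    · simp [pvBump, h, Ne.symm h]; ring

lemma pvE_symm (f : Nat → Int) (i j : Nat) : pvE f i j = pvE f j i := by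
  unfold pvE
  by_cases h : i = j
  · simp [h]
  · by_cases hf : f i = f j <;> simp [h, Ne.symm h, hf]; omega

-- Σ_{i<n} Σ_{j<n} [i≠j ∧ f i = f j]  =  the bucket pass's total
lemma count_pairs (f : Nat → Int) : ∀ n : Nat,
    ((List.range n).map (fun i => ((List.range n).map (fun j => pvE f i j)).sum)).sum
      = pvS ((List.range n).map f) (fun _ => 0) := by
  intro n
  induction n with
  | zero => simp [pvS]
  | succ n ih =>
    rw [List.range_succ]
    simp only [List.map_append, List.sum_append, List.map_cons, List.map_nil, List.sum_cons,
      List.sum_nil, add_zero]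
    rw [pvS_append, PySem.List.sum_map_add_int, ih]
    have hEn : pvE f n n = 0 := by simp [pvE]
    have hcnt : ((List.range n).map (fun j => pvE f n j)).sum
        = (((List.range n).map f).count (f n) : Int) := by
      have h1 : ∀ j ∈ List.range n, pvE f n j = if (f j == f n) = true then 1 else 0 := by
        intro j hj
        have : j < n := List.mem_range.mp hj
        unfold pvE
        by_cases hf : f j = f n
        · rw [if_pos ⟨by omega, hf.symm⟩]; simp [hf]
        · rw [if_neg (fun h => hf h.2.symm)]; simp [hf]
      rw [List.map_congr_left h1, PySem.List.sum_map_ite_one_zero]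
      rw [List.count_eq_countP, List.countP_map]
      rfl
    have hcol : ((List.range n).map (fun i => pvE f i n)).sum
        = ((List.range n).map (fun j => pvE f n j)).sum :=
      congrArg _ (List.map_congr_left (fun i _ => pvE_symm f i n))
    rw [hcol, hEn, hcnt]
    ring

lemma pyRange_eq_nil {j n : Int} (h : ¬ j < n) : PySem.List.pyRange j n 1 = [] := by
  rw [PySem.List.pyRange]; simp; omega

-- A-side inner while loop, unrolled to a sum
lemma pvWhileJ_eq (vec : List Int) (n i : Int) : ∀ (j point : Int),
    pvWhileJ vec n i j point = point +
      ((PySem.List.pyRange j n 1).map (fun jj =>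
        if i ≠ jj ∧ |i - jj| = |PySem.List.pyGetD vec i 0 - PySem.List.pyGetD vec jj 0|
        then (1:Int) else 0)).sum := by
  intro j
  induction hk : (n - j).toNat generalizing j with
  | zero =>
    intro point
    have hj : ¬ j < n := by omega
    rw [pvWhileJ, if_neg hj, pyRange_eq_nil hj]
    simp
  | succ k ih =>
    intro point
    have hj : j < n := by omega
    rw [pvWhileJ, if_pos hj, ih (j + 1) (by omega), PySem.List.pyRange_one_cons hj]
    simp only [List.map_cons, List.sum_cons]
    by_cases h1 : i ≠ j
    · by_cases h2 : |i - j| = |PySem.List.pyGetD vec i 0 - PySem.List.pyGetD vec j 0|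
      · rw [if_pos h1, if_pos h2, if_pos ⟨h1, h2⟩]; ring
      · rw [if_pos h1, if_neg h2, if_neg (fun h => h2 h.2)]; ring
    · rw [if_neg h1, if_neg (fun h => h1 h.1)]; ring

-- the indicator splits along the two diagonal families (exclusive for k ≠ j)
lemma ind_split (vec : List Int) (k j : Nat) :
    pvInd vec k j = pvE (pvF1 vec) k j + pvE (pvF2 vec) k j := by
  unfold pvInd pvE pvF1 pvF2
  by_cases hkj : k = j
  · simp [hkj]
  · have hkj' : (k:Int) ≠ (j:Int) := by exact_mod_cast hkj
    by_cases h1 : (k:Int) - vec.getD k 0 = (j:Int) - vec.getD j 0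
    · have h2 : ¬ ((k:Int) + vec.getD k 0 = (j:Int) + vec.getD j 0) := by omega
      have habs : |(k:Int) - (j:Int)| = |vec.getD k 0 - vec.getD j 0| := by
        have e : ((k:Int) - (j:Int)) = vec.getD k 0 - vec.getD j 0 := by omega
        rw [e]
      rw [if_pos ⟨hkj', habs⟩, if_pos ⟨hkj, h1⟩, if_neg (fun h => h2 h.2)]
      norm_num
    · by_cases h2 : (k:Int) + vec.getD k 0 = (j:Int) + vec.getD j 0
      · have habs : |(k:Int) - (j:Int)| = |vec.getD k 0 - vec.getD j 0| := by
          have e : ((k:Int) - (j:Int)) = -(vec.getD k 0 - vec.getD j 0) := by omega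
          rw [e, abs_neg]
        rw [if_pos ⟨hkj', habs⟩, if_neg (fun h => h1 h.2), if_pos ⟨hkj, h2⟩]
        norm_num
      · have hno : ¬((k:Int) ≠ (j:Int) ∧ |(k:Int) - (j:Int)| = |vec.getD k 0 - vec.getD j 0|) := by
          rintro ⟨-, habs⟩
          rcases abs_eq_abs.mp habs with h | h <;> omega
        rw [if_neg hno, if_neg (fun h => h1 h.2), if_neg (fun h => h2 h.2)]
        norm_num

-- B-side fold, expressed through pvS over the two key streams
lemma fold_threats : ∀ (L : List (Int × Int)) (t : Int) (D1 D2 : PySem.Dict Int Int),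
    (L.foldl pvThreatStep (t, D1, D2)).1
      = t + pvS (L.map fun iv => iv.1 - iv.2) (fun a => D1.getD a 0)
          + pvS (L.map fun iv => iv.1 + iv.2) (fun b => D2.getD b 0) := by
  intro L
  induction L with
  | nil => intro t D1 D2; simp [pvS]
  | cons iv L ih =>
    intro t D1 D2
    rw [List.foldl_cons]
    simp only [pvThreatStep]
    rw [ih]
    have hb1 : (fun a => (D1.insert (iv.1 - iv.2) (D1.getD (iv.1 - iv.2) 0 + 1)).getD a 0)
        = pvBump (fun a => D1.getD a 0) (iv.1 - iv.2) := by
      funext a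
      rw [PySem.Dict.getD_insert]
      unfold pvBump
      by_cases h : a = iv.1 - iv.2 <;> simp [h]
    have hb2 : (fun b => (D2.insert (iv.1 + iv.2) (D2.getD (iv.1 + iv.2) 0 + 1)).getD b 0)
        = pvBump (fun b => D2.getD b 0) (iv.1 + iv.2) := by
      funext b
      rw [PySem.Dict.getD_insert]
      unfold pvBump
      by_cases h : b = iv.1 + iv.2 <;> simp [h]
    rw [hb1, hb2]
    simp only [List.map_cons, pvS]
    ring

-- enumerate, mapped through a binary function, as a map over range
lemma enum_map (F : Int → Int → Int) : ∀ (vec : List Int) (s : Int),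
    (PySem.List.enumerate vec s).map (fun iv => F iv.1 iv.2)
      = (List.range vec.length).map (fun (k : Nat) => F (s + (k:Int)) (vec.getD k 0)) := by
  intro vec
  induction vec with
  | nil => intro s; simp [PySem.List.enumerate]
  | cons x xs ih =>
    intro s
    rw [PySem.List.enumerate, List.map_cons, ih (s + 1)]
    rw [List.length_cons, List.range_succ_eq_map, List.map_cons, List.map_map]
    refine congrArg₂ _ (by simp) (List.map_congr_left ?_)
    intro k _
    simp only [Function.comp_apply, Nat.succ_eq_add_one, List.getD_cons_succ]
    congr 1
    push_cast
    ring

-- the per-board core: A's all-pairs count = B's bucket pass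
lemma threats_eq (vec : List Int) : cant_amenazas vec = pvThreats vec := by
  have hA : cant_amenazas vec
      = ((List.range vec.length).map (fun (k : Nat) =>
          ((List.range vec.length).map (fun (j : Nat) => pvInd vec k j)).sum)).sum := by
    unfold cant_amenazas
    have hstep : ∀ (point i : Int), pvWhileJ vec (vec.length : Int) i 0 point
        = point + ((PySem.List.pyRange 0 (vec.length : Int) 1).map (fun jj =>
            if i ≠ jj ∧ |i - jj| = |PySem.List.pyGetD vec i 0 - PySem.List.pyGetD vec jj 0|
            then (1:Int) else 0)).sum := fun point i => pvWhileJ_eq vec (vec.length : Int) i 0 point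
    simp only [hstep]
    rw [PySem.List.foldl_add, zero_add, PySem.List.pyRange_zero_natCast, List.map_map]
    refine congrArg List.sum (List.map_congr_left ?_)
    intro k _
    simp only [Function.comp_apply]
    rw [List.map_map]
    refine congrArg List.sum (List.map_congr_left ?_)
    intro j _
    simp only [Function.comp_apply, PySem.List.pyGetD_natCast, pvInd]
  have hB : pvThreats vec
      = pvS ((List.range vec.length).map (pvF1 vec)) (fun _ => 0)
        + pvS ((List.range vec.length).map (pvF2 vec)) (fun _ => 0) := by
    unfold pvThreats
    rw [fold_threats]
    have he : (fun a => (PySem.Dict.empty : PySem.Dict Int Int).getD a 0) = (fun _ => (0:Int)) := by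
      funext a; simp [PySem.Dict.empty, PySem.Dict.getD, PySem.Dict.get?]
    rw [he, enum_map (fun i v => i - v) vec 0, enum_map (fun i v => i + v) vec 0]
    simp only [zero_add]
    rfl
  rw [hA, hB]
  have hsplit : ∀ k ∈ List.range vec.length,
      ((List.range vec.length).map (fun (j : Nat) => pvInd vec k j)).sum
      = ((List.range vec.length).map (fun j => pvE (pvF1 vec) k j)).sum
        + ((List.range vec.length).map (fun j => pvE (pvF2 vec) k j)).sum := by
    intro k _
    rw [← PySem.List.sum_map_add_int]
    exact congrArg _ (List.map_congr_left (fun j _ => ind_split vec k j))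
  rw [List.map_congr_left hsplit, PySem.List.sum_map_add_int,
    count_pairs (pvF1 vec), count_pairs (pvF2 vec)]

-- sorting a mapped list by a key read off the image = mapping the sort
lemma insertBy_map {α β : Type} (g : α → β) (before : α → α → Bool) (before' : β → β → Bool)
    (h : ∀ a b, before' (g a) (g b) = before a b) (x : α) : ∀ (acc : List α),
    PySem.List.insertBy before' (g x) (acc.map g) = (PySem.List.insertBy before x acc).map g := by
  intro acc
  induction acc with
  | nil => simp [PySem.List.insertBy]
  | cons y ys ih =>
    simp only [List.map_cons, PySem.List.insertBy, h]
    by_cases hb : before x y <;> simp [hb, ih]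

lemma sorted_map {α β κ : Type} [LT κ] [DecidableLT κ] (g : α → β) (key : β → κ) (xs : List α) :
    PySem.List.sorted (xs.map g) key false
      = (PySem.List.sorted xs (fun x => key (g x)) false).map g := by
  unfold PySem.List.sorted
  simp only [if_neg (by simp : ¬ (false = true))]
  have hgen : ∀ (l : List α) (acc : List α),
      List.foldl (fun acc x => PySem.List.insertBy (fun a b => decide (key a < key b)) x acc)
        (acc.map g) (l.map g)
      = (List.foldl (fun acc x => PySem.List.insertBy (fun a b => decide (key (g a) < key (g b))) x acc)
          acc l).map g := by
    intro l
    induction l with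
    | nil => intro acc; simp
    | cons x l ih =>
      intro acc
      simp only [List.map_cons, List.foldl_cons]
      rw [insertBy_map g _ _ (fun a b => rfl) x acc, ih]
  simpa using hgen xs []

-- the whole selection
lemma seleccion_eq_alt (p : List (List Int)) : seleccion p = seleccion_alt p := by
  by_cases hn : p.length ≤ 2
  · simp [seleccion, seleccion_alt, hn]
  · have hfit : calcular_fitness p
        = (PySem.List.pyRange 0 (p.length : Int) 1).map
            (fun i => (cant_amenazas (PySem.List.pyGetD p i []), i)) := by
      unfold calcular_fitness
      rw [PySem.List.foldl_append_singleton_eq_map]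
      simp
    have hkey : (fun i : Int => pvThreats (PySem.List.pyGetD p i []))
        = (fun i : Int => cant_amenazas (PySem.List.pyGetD p i [])) := by
      funext i; rw [threats_eq]
    simp only [seleccion, seleccion_alt, if_neg hn, hkey, hfit]
    set f : Int → Int := fun i => cant_amenazas (PySem.List.pyGetD p i []) with hf
    rw [sorted_map (fun i => (f i, i)) (fun t => t.1) (PySem.List.pyRange 0 (p.length : Int) 1),
      show (fun x : Int => ((f x, x) : Int × Int).1) = f from rfl]
    set order := PySem.List.sorted (PySem.List.pyRange 0 (p.length : Int) 1) f false with horder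
    have hlen : order.length = p.length := by
      rw [horder, PySem.List.length_sorted, PySem.List.pyRange_zero_natCast]
      simp
    have hm : ((p.length : Int) - 2) = ((p.length - 2 : Nat) : Int) := by omega
    rw [PySem.List.foldl_append_singleton_eq_map, List.nil_append, hm,
      PySem.List.slice_to_natCast, PySem.List.pyRange_zero_natCast, List.map_map]
    apply List.ext_getElem
    · simp only [List.length_map, List.length_range, List.length_take, hlen]
      omega
    · intro k hk1 hk2
      simp only [List.getElem_map, List.getElem_range, Function.comp_apply, List.getElem_take]
      have hkord : k < order.length := by
        simp only [List.length_map, List.length_range] at hk1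
        omega
      rw [PySem.List.pyGetD_natCast]
      rw [List.getD_eq_getElem _ _ (by simp [hkord])]
      simp

-- ===== VERDICT (by name: the statement is the Claim_ definition above) =====
theorem seleccion_spec : Claim_equal_seleccion := by
  intro p _
  unfold Spec_seleccion
  exact seleccion_eq_alt p
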